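-- pv_equiv track=rewrite | github.com/aYaFish/leetcode | 90.subsets-ii.py | subsetsSizeKWithDup
-- ===== SOURCE A (Python) =====
-- from typing import List
--
-- def subsetsSizeKWithDup(nums: List[int], k: int) -> List[List[int]]:
--     nums.sort()
--     path = []
--     ans = []
--
--     def dfs(nums, pos):
--         if len(path) == k:
--             ans.append(path[:])
--             return
--         if pos == len(nums):
--             return
--
--         for i in range(pos, len(nums)):
--             if i>pos and nums[i] == nums[i-1]:
--                 continue
--             path.append(nums[i])
--             dfs(nums, i+1)
--             path.pop()
--
--     dfs(nums, 0)
--     return ans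
-- ===== SOURCE B (Python) =====
-- from typing import List
--
-- def subsetsSizeKWithDup(nums: List[int], k: int) -> List[List[int]]:
--     nums.sort()
--
--     # run-length encode the sorted list into (value, count) groups
--     def groups(lst):
--         if not lst:
--             return []
--         run = 1
--         while run < len(lst) and lst[run] == lst[0]:
--             run += 1
--         return [(lst[0], run)] + groups(lst[run:])
--
--     gs = groups(nums)
--     ans = []
--
--     # choose how many copies of each group's value to take, largest first
--     def go(idx, remaining, path):
--         if idx == len(gs):
--             if remaining == 0:
--                 ans.append(path)
--             return
--         v, cnt = gs[idx]
--         for c in range(min(cnt, remaining), -1, -1):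
--             go(idx + 1, remaining - c, path + [v] * c)
--
--     go(0, k, [])
--     return ans
-- ===== Notes on version B (the rewrite author's own statement) =====
-- stated objective: alternative
-- what changed: A's index-based DFS that re-scans and skips consecutive duplicates at every level is replaced by run-length encoding the sorted list into (value, count) groups once and recursing over groups, choosing how many copies of each value to take (largest first), which reproduces A's exact output order.
import Mathlib
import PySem

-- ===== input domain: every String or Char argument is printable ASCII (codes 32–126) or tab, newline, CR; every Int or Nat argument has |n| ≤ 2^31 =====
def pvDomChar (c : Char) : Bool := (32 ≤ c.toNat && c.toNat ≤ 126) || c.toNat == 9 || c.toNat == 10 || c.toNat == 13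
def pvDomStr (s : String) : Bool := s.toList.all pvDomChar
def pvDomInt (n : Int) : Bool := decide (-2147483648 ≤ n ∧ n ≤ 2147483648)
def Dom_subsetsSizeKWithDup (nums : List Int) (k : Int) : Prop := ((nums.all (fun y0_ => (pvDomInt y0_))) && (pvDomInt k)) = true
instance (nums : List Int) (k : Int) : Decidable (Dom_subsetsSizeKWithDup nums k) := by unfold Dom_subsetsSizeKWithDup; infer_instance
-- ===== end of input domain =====

-- B replaces A's index-DFS with duplicate-skipping by a recursion over (value, count)
-- groups of the sorted list, choosing how many copies of each value to take (largest
-- count first); objective: alternative decomposition, same output.  NOTE: Python A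
-- sorts nums in place (so does Python B); the equivalence proved here is about the
-- RETURN value.

-- ===== PORT A =====
-- dfsA/loopA transliterate A's nested `dfs` and its `for i in range(pos, len(nums))`
-- loop; `path`/`ans` (mutated via closure in Python) are threaded as arguments; the
-- append/dfs/pop body becomes passing `path ++ [nums[i]]` to the recursive call.
-- nums.getD i 0 = Python nums[i], exact because every access has 0 ≤ i < len(nums).
mutual
def dfsA (nums : List Int) (k : Int) (pos : Nat) (path : List Int) (ans : List (List Int)) : List (List Int) :=
  if (path.length : Int) = k then ans ++ [path]
  else if pos = nums.length then ans
  else loopA nums k pos pos path ans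
termination_by 2 * (nums.length - pos) + 1
decreasing_by omega

def loopA (nums : List Int) (k : Int) (pos i : Nat) (path : List Int) (ans : List (List Int)) : List (List Int) :=
  if _h : i < nums.length then
    if pos < i ∧ nums.getD i 0 = nums.getD (i - 1) 0 then
      loopA nums k pos (i + 1) path ans
    else
      loopA nums k pos (i + 1) path (dfsA nums k (i + 1) (path ++ [nums.getD i 0]) ans)
  else ans
termination_by 2 * (nums.length - i)
decreasing_by all_goals omega
end

def subsetsSizeKWithDup (nums : List Int) (k : Int) : List (List Int) :=
  let nums := PySem.List.sorted nums (fun x => x) false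
  dfsA nums k 0 [] []

-- ===== PORT B =====
-- rleB = Source B's `groups` (the counting while-loop is takeWhile/dropWhile of the same
-- predicate); dfsB = Source B's `go`, with the `for c in range(min(cnt, remaining), -1, -1)`
-- loop as a foldl over PySem.List.pyRange; `[v] * c` is List.replicate (c ≥ 0 in the range).
def rleB (l : List Int) : List (Int × Int) :=
  match l with
  | [] => []
  | v :: t =>
      (v, 1 + ((t.takeWhile (fun x => x == v)).length : Int)) :: rleB (t.dropWhile (fun x => x == v))
termination_by l.length
decreasing_by
  have := List.length_dropWhile_le (p := fun x => x == v) (l := t)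
  simp only [List.length_cons]; omega

def dfsB (gs : List (Int × Int)) (remaining : Int) (path : List Int) (ans : List (List Int)) : List (List Int) :=
  match gs with
  | [] => if remaining = 0 then ans ++ [path] else ans
  | (v, cnt) :: rest =>
      (PySem.List.pyRange (min cnt remaining) (-1) (-1)).foldl
        (fun acc c => dfsB rest (remaining - c) (path ++ List.replicate c.toNat v) acc) ans

def subsetsSizeKWithDup_alt (nums : List Int) (k : Int) : List (List Int) :=
  let nums := PySem.List.sorted nums (fun x => x) false
  dfsB (rleB nums) k [] []

-- ===== PRECONDITION & SPEC =====
def Spec_subsetsSizeKWithDup (nums : List Int) (k : Int) (out : List (List Int)) : Prop := out = subsetsSizeKWithDup_alt nums k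
instance (nums : List Int) (k : Int) (out : List (List Int)) : Decidable (Spec_subsetsSizeKWithDup nums k out) := by unfold Spec_subsetsSizeKWithDup; infer_instance

-- ===== CLAIM (what is proved, stated in full; the proofs are below) =====
def Claim_equal_subsetsSizeKWithDup : Prop := ∀ (nums : List Int) (k : Int), Dom_subsetsSizeKWithDup nums k → Spec_subsetsSizeKWithDup nums k (subsetsSizeKWithDup nums k)

-- ===== LEMMAS AND PROOFS =====

-- pos-free version of loopA: for every index i ≥ 1 the duplicate-skip test fires
-- (used to describe loopA once the loop has moved past its starting index).
def loopS (nums : List Int) (k : Int) (i : Nat) (path : List Int) (ans : List (List Int)) : List (List Int) :=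
  if _h : i < nums.length then
    if 0 < i ∧ nums.getD i 0 = nums.getD (i - 1) 0 then
      loopS nums k (i + 1) path ans
    else
      loopS nums k (i + 1) path (dfsA nums k (i + 1) (path ++ [nums.getD i 0]) ans)
  else ans
termination_by nums.length - i

theorem loopS_of_ge (nums : List Int) (k : Int) (i : Nat) (path : List Int) (ans : List (List Int))
    (h : nums.length ≤ i) : loopS nums k i path ans = ans := by
  rw [loopS]; simp [Nat.not_lt.mpr h]

theorem loopA_eq_loopS (nums : List Int) (k : Int) :
    ∀ (fuel p i : Nat) (path : List Int) (ans : List (List Int)),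
      nums.length - i ≤ fuel → p < i → loopA nums k p i path ans = loopS nums k i path ans := by
  intro fuel
  induction fuel with
  | zero =>
      intro p i path ans hf hp
      rw [loopA, loopS]
      have : ¬ i < nums.length := by omega
      simp [this]
  | succ n ih =>
      intro p i path ans hf hp
      rw [loopA, loopS]
      by_cases hi : i < nums.length
      · simp only [dif_pos hi]
        by_cases hd : nums.getD i 0 = nums.getD (i - 1) 0
        · have h1 : (p < i ∧ nums.getD i 0 = nums.getD (i - 1) 0) := ⟨hp, hd⟩
          have h2 : (0 < i ∧ nums.getD i 0 = nums.getD (i - 1) 0) := ⟨by omega, hd⟩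
          simp only [if_pos h1, if_pos h2]
          exact ih p (i + 1) path ans (by omega) (by omega)
        · have h1 : ¬ (p < i ∧ nums.getD i 0 = nums.getD (i - 1) 0) := by tauto
          have h2 : ¬ (0 < i ∧ nums.getD i 0 = nums.getD (i - 1) 0) := by tauto
          simp only [if_neg h1, if_neg h2]
          exact ih p (i + 1) _ _ (by omega) (by omega)
      · simp [hi]

-- A explores but appends nothing once the path is already longer than k.
theorem dfsA_loopA_of_lt (nums : List Int) (k : Int) :
    ∀ (fuel : Nat),
      (∀ (pos : Nat) (path : List Int) (ans : List (List Int)),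
          2 * (nums.length - pos) + 1 ≤ fuel → k < (path.length : Int) →
          dfsA nums k pos path ans = ans) ∧
      (∀ (p i : Nat) (path : List Int) (ans : List (List Int)),
          2 * (nums.length - i) ≤ fuel → k < (path.length : Int) →
          loopA nums k p i path ans = ans) := by
  intro fuel
  induction fuel with
  | zero =>
      constructor
      · intro pos path ans hf; omega
      · intro p i path ans hf hk
        rw [loopA]
        have : ¬ i < nums.length := by omega
        simp [this]
  | succ n ih =>
      constructor
      · intro pos path ans hf hk
        rw [dfsA]
        have h1 : ¬ (path.length : Int) = k := by omega
        by_cases h2 : pos = nums.length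
        · simp [h1, h2]
        · simp only [if_neg h1, if_neg h2]
          exact ih.2 pos pos path ans (by omega) hk
      · intro p i path ans hf hk
        rw [loopA]
        by_cases hi : i < nums.length
        · simp only [dif_pos hi]
          have hk' : k < (((path ++ [nums.getD i 0]).length : Nat) : Int) := by
            rw [List.length_append, List.length_cons, List.length_nil]; push_cast; omega
          have hd := ih.1 (i + 1) (path ++ [nums.getD i 0]) ans (by omega) hk'
          split
          · exact ih.2 p (i + 1) path ans (by omega) hk
          · rw [hd]; exact ih.2 p (i + 1) path ans (by omega) hk
        · simp [hi]

-- B with negative remaining: the count range is empty everywhere, nothing is appended.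
theorem dfsB_of_neg (gs : List (Int × Int)) (rem : Int) (path : List Int) (ans : List (List Int))
    (h : rem < 0) : dfsB gs rem path ans = ans := by
  match gs with
  | [] => simp [dfsB]; omega
  | (v, cnt) :: rest =>
      have : PySem.List.pyRange (min cnt rem) (-1) (-1) = [] :=
        PySem.List.pyRange_neg_one_eq_nil (by omega)
      simp [dfsB, this]

-- every group produced by rleB has a positive count
theorem rleB_pos : ∀ (l : List Int), ∀ g ∈ rleB l, 1 ≤ g.2 := by
  intro l
  induction l using rleB.induct with
  | case1 => simp [rleB]
  | case2 v t ih =>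
      intro g hg
      rw [rleB] at hg
      rcases List.mem_cons.mp hg with h | h
      · subst h; simp
      · exact ih g h

theorem pyRange_zero_down : PySem.List.pyRange 0 (-1) (-1) = [0] := by
  rw [PySem.List.pyRange_neg_one_cons (by omega)]
  rw [PySem.List.pyRange_neg_one_eq_nil (by omega)]

-- B with remaining = 0: takes 0 of every group and appends the path once.
theorem dfsB_zero : ∀ (gs : List (Int × Int)), (∀ g ∈ gs, 1 ≤ g.2) →
    ∀ (path : List Int) (ans : List (List Int)), dfsB gs 0 path ans = ans ++ [path] := by
  intro gs
  induction gs with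
  | nil => intro _ path ans; simp [dfsB]
  | cons g rest ih =>
      intro hpos path ans
      obtain ⟨v, cnt⟩ := g
      have hc : 1 ≤ cnt := hpos (v, cnt) (by simp)
      have hmin : min cnt (0 : Int) = 0 := by omega
      rw [dfsB]
      rw [hmin, pyRange_zero_down]
      simp only [List.foldl_cons, List.foldl_nil]
      simp only [Int.sub_zero, Int.toNat_zero, List.replicate_zero, List.append_nil]
      exact ih (fun g hg => hpos g (by simp [hg])) path ans

-- unrolling the countdown fold: the whole fold at bound a equals taking the
-- largest counts (shifted by one extra copy of v) and finishing with c = 0.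
theorem fold_countdown (rst : List (Int × Int)) (v : Int) (rem : Int) (path : List Int) :
    ∀ (n : Nat) (ans : List (List Int)),
      (PySem.List.pyRange (n : Int) (-1) (-1)).foldl
        (fun acc c => dfsB rst (rem - c) (path ++ List.replicate c.toNat v) acc) ans
      = dfsB rst rem path
          ((PySem.List.pyRange ((n : Int) - 1) (-1) (-1)).foldl
            (fun acc c => dfsB rst (rem - 1 - c) ((path ++ [v]) ++ List.replicate c.toNat v) acc) ans) := by
  intro n
  induction n with
  | zero =>
      intro ans
      simp only [Nat.cast_zero]
      rw [pyRange_zero_down]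
      rw [show (0 : Int) - 1 = -1 by omega, PySem.List.pyRange_neg_one_eq_nil (by omega)]
      simp
  | succ m ih =>
      intro ans
      rw [PySem.List.pyRange_neg_one_cons (a := ((m + 1 : Nat) : Int)) (by omega)]
      simp only [List.foldl_cons]
      have e1 : rem - ((m + 1 : Nat) : Int) = rem - 1 - ((m : Nat) : Int) := by push_cast; ring
      have e2 : path ++ List.replicate (((m + 1 : Nat) : Int)).toNat v
          = (path ++ [v]) ++ List.replicate (((m : Nat) : Int)).toNat v := by
        rw [show (((m + 1 : Nat) : Int)).toNat = m + 1 by omega,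
          show (((m : Nat) : Int)).toNat = m by omega, List.replicate_succ]
        simp
      rw [show ((m + 1 : Nat) : Int) - 1 = ((m : Nat) : Int) by push_cast; ring]
      rw [ih]
      congr 1
      rw [PySem.List.pyRange_neg_one_cons (a := ((m : Nat) : Int)) (by omega)]
      simp only [List.foldl_cons]
      rw [e1, e2]

theorem takeWhile_eq_nil_dropWhile {l : List Int} {v : Int}
    (h : (l.takeWhile (fun x => x == v)).length = 0) :
    l.dropWhile (fun x => x == v) = l := by
  cases l with
  | nil => simp
  | cons x t =>
      by_cases hx : x == v
      · simp [hx] at h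
      · simp [hx]

theorem rleB_head_run {t : List Int} {v : Int} {a : Nat}
    (ha : (t.takeWhile (fun x => x == v)).length = a) (h1 : 1 ≤ a) :
    rleB t = (v, (a : Int)) :: rleB (t.dropWhile (fun x => x == v)) := by
  cases t with
  | nil => simp at ha; omega
  | cons x t' =>
      by_cases hx : x == v
      · have hxv : x = v := by simpa using hx
        subst hxv
        rw [rleB]
        have h2 : (t'.takeWhile (fun y => y == x)).length + 1 = a := by
          simpa using ha
        have h3 : List.dropWhile (fun y => y == x) (x :: t') = List.dropWhile (fun y => y == x) t' := by
          simp
        rw [h3]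
        have h4 : (1 : Int) + ((t'.takeWhile (fun y => y == x)).length : Int) = (a : Int) := by omega
        rw [h4]
      · simp [hx] at ha; omega

theorem dropWhile_eq_drop_tw (p : Int → Bool) : ∀ (l : List Int),
    l.dropWhile p = l.drop (l.takeWhile p).length := by
  intro l
  induction l with
  | nil => simp
  | cons x t ih =>
      by_cases hx : p x <;> simp [hx, ih]

-- elements of the leading run are duplicates of their predecessor
theorem run_dup (nums : List Int) (pos : Nat) (v : Int) (t : List Int)
    (hd : nums.drop pos = v :: t) :
    ∀ (j : Nat), pos + 1 ≤ j → j < pos + 1 + (t.takeWhile (fun x => x == v)).length →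
      nums.getD j 0 = nums.getD (j - 1) 0 := by
  intro j hj1 hj2
  set a := (t.takeWhile (fun x => x == v)).length with ha
  have hlen : nums.length = pos + 1 + t.length := by
    have h9 : (nums.drop pos).length = nums.length - pos := by simp
    rw [hd] at h9
    simp at h9
    omega
  have hta : a ≤ t.length := by
    rw [ha]; exact (List.takeWhile_prefix _).length_le
  have htw : ∀ (idx : Nat), idx < a → t.getD idx 0 = v := by
    intro idx hidx
    have hpre := List.takeWhile_prefix (l := t) (p := fun x => x == v)
    have hgetp : (t.takeWhile (fun x => x == v))[idx] = t[idx]'(by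
        have := hpre.length_le; omega) := hpre.getElem (by omega)
    have hmem : (t.takeWhile (fun x => x == v))[idx] ∈ t.takeWhile (fun x => x == v) :=
      List.getElem_mem _
    have := List.mem_takeWhile_imp hmem
    simp at this
    rw [List.getD_eq_getElem _ _ (by omega)]
    rw [← hgetp, this]
  -- nums.getD (pos + 1 + idx) 0 = t.getD idx 0
  have hnum : ∀ (idx : Nat), idx < t.length → nums.getD (pos + 1 + idx) 0 = t.getD idx 0 := by
    intro idx hidx
    have h1 : nums.getD (pos + 1 + idx) 0 = (nums.drop pos).getD (1 + idx) 0 := by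
      rw [List.getD_eq_getElem?_getD, List.getD_eq_getElem?_getD, List.getElem?_drop,
        show pos + (1 + idx) = pos + 1 + idx from by omega]
    rw [h1, hd]
    simp [show 1 + idx = idx + 1 by omega]
  -- j = pos + 1 + idx with idx < a
  obtain ⟨idx, rfl⟩ : ∃ idx, j = pos + 1 + idx := ⟨j - (pos + 1), by omega⟩
  have hidx : idx < a := by omega
  rw [hnum idx (by omega), htw idx hidx]
  cases idx with
  | zero =>
      have h2 : (nums.drop pos).getD 0 0 = v := by rw [hd]; rfl
      rw [List.getD_eq_getElem?_getD, List.getElem?_drop] at h2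
      have h3 : nums.getD pos 0 = v := by
        rw [List.getD_eq_getElem?_getD, show pos = pos + 0 from by omega]
        exact h2
      simpa [show pos + 1 + 0 - 1 = pos by omega] using h3.symm
  | succ m =>
      rw [show pos + 1 + (m + 1) - 1 = pos + 1 + m by omega, hnum m (by omega), htw m (by omega)]

-- skipping a run of duplicates in loopS
theorem loopS_run (nums : List Int) (k : Int) (path : List Int) :
    ∀ (c i : Nat) (ans : List (List Int)), 0 < i →
      (∀ j, i ≤ j → j < i + c → nums.getD j 0 = nums.getD (j - 1) 0) →
      loopS nums k i path ans = loopS nums k (i + c) path ans := by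
  intro c
  induction c with
  | zero => intro i ans _ _; rfl
  | succ m ih =>
      intro i ans hi hdup
      by_cases hil : i < nums.length
      · have hstep : loopS nums k i path ans = loopS nums k (i + 1) path ans := by
          rw [loopS]
          simp only [dif_pos hil]
          rw [if_pos ⟨hi, hdup i (by omega) (by omega)⟩]
        rw [hstep, ih (i + 1) ans (by omega) (fun j h1 h2 => hdup j (by omega) (by omega)),
          show i + 1 + m = i + (m + 1) by omega]
      · rw [loopS_of_ge _ _ _ _ _ (by omega), loopS_of_ge _ _ _ _ _ (by omega)]

-- at a non-duplicate boundary (or the end), loopS restarts as a fresh dfsA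
theorem dfsA_eq_loopS (nums : List Int) (k : Int) (j : Nat) (path : List Int) (ans : List (List Int))
    (hk : ¬ (path.length : Int) = k) (hj : j ≤ nums.length)
    (hb : j = nums.length ∨ ¬ (0 < j ∧ nums.getD j 0 = nums.getD (j - 1) 0)) :
    dfsA nums k j path ans = loopS nums k j path ans := by
  rcases Nat.lt_or_ge j nums.length with hlt | hge
  · have hb' : ¬ (0 < j ∧ nums.getD j 0 = nums.getD (j - 1) 0) := by
      rcases hb with h | h
      · omega
      · exact h
    rw [dfsA]
    rw [if_neg hk, if_neg (by omega : ¬ j = nums.length)]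
    rw [loopA]
    simp only [dif_pos hlt]
    rw [if_neg (by simp)]
    rw [loopA_eq_loopS nums k (nums.length - (j + 1)) j (j + 1) _ _ (by omega) (by omega)]
    conv_rhs => rw [loopS]
    simp only [dif_pos hlt]
    rw [if_neg hb']
  · have hj' : j = nums.length := by omega
    rw [dfsA, if_neg hk, if_pos hj', loopS_of_ge _ _ _ _ _ hge]

-- MAIN LEMMA: A's dfs from position pos equals B's group recursion on the
-- run-length encoding of the remaining suffix, with remaining = k - len(path).
theorem main_lemma (nums : List Int) (k : Int) :
    ∀ (fuel pos : Nat) (path : List Int) (ans : List (List Int)),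
      nums.length - pos ≤ fuel → pos ≤ nums.length →
      dfsA nums k pos path ans = dfsB (rleB (nums.drop pos)) (k - path.length) path ans := by
  intro fuel
  induction fuel with
  | zero =>
      intro pos path ans hf hp
      have hpos : pos = nums.length := by omega
      subst hpos
      rw [dfsA, List.drop_length, rleB, dfsB]
      by_cases hk : (path.length : Int) = k
      · rw [if_pos hk, if_pos (by omega)]
      · rw [if_neg hk, if_pos rfl, if_neg (by omega)]
  | succ n ih =>
      intro pos path ans hf hp
      by_cases hpos : pos = nums.length
      · subst hpos
        rw [dfsA, List.drop_length, rleB, dfsB]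
        by_cases hk : (path.length : Int) = k
        · rw [if_pos hk, if_pos (by omega)]
        · rw [if_neg hk, if_pos rfl, if_neg (by omega)]
      · have hlt : pos < nums.length := by omega
        by_cases hk : (path.length : Int) = k
        · -- remaining = 0 : both sides append path once
          rw [dfsA, if_pos hk]
          rw [show k - (path.length : Int) = 0 by omega]
          rw [dfsB_zero _ (rleB_pos _) path ans]
        by_cases hneg : k - (path.length : Int) < 0
        · -- remaining < 0 : both sides are a no-op
          rw [(dfsA_loopA_of_lt nums k (2 * (nums.length - pos) + 1)).1 pos path ans le_rfl (by omega)]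
          rw [dfsB_of_neg _ _ _ _ hneg]
        -- remaining ≥ 1
        have hrem : 1 ≤ k - (path.length : Int) := by omega
        set rem := k - (path.length : Int) with hremdef
        have hd : nums.drop pos = nums.getD pos 0 :: nums.drop (pos + 1) := by
          rw [List.getD_eq_getElem _ _ hlt]
          rw [← List.getElem_cons_drop]
        set v := nums.getD pos 0 with hv
        set t := nums.drop (pos + 1) with ht
        set a := (t.takeWhile (fun x => x == v)).length with ha
        have hlen : nums.length = pos + 1 + t.length := by
          rw [ht, List.length_drop]; omega
        have hta : a ≤ t.length := by
          rw [ha]; exact (List.takeWhile_prefix _).length_le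
        -- LHS: unfold one level of A
        have step1 : dfsA nums k pos path ans
            = loopS nums k (pos + 1) path (dfsA nums k (pos + 1) (path ++ [v]) ans) := by
          rw [dfsA, if_neg hk, if_neg hpos, loopA]
          simp only [dif_pos hlt]
          rw [if_neg (by simp)]
          exact loopA_eq_loopS nums k (nums.length - (pos + 1)) pos (pos + 1) _ _ (by omega) (by omega)
        set X := dfsA nums k (pos + 1) (path ++ [v]) ans with hX
        have step2 : loopS nums k (pos + 1) path X = loopS nums k (pos + 1 + a) path X :=
          loopS_run nums k path a (pos + 1) X (by omega) (run_dup nums pos v t hd)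
        have hboundary : pos + 1 + a = nums.length ∨
            ¬ (0 < pos + 1 + a ∧ nums.getD (pos + 1 + a) 0 = nums.getD (pos + 1 + a - 1) 0) := by
          by_cases hend : pos + 1 + a = nums.length
          · exact Or.inl hend
          right
          intro ⟨_, hdup⟩
          -- nums.getD (pos+1+a) = t.getD a, which fails the predicate; getD (pos+a) = v
          have hrest : t.dropWhile (fun x => x == v) = t.drop a := by
            rw [dropWhile_eq_drop_tw, ← ha]
          have hgt : nums.getD (pos + 1 + a) 0 = t.getD a 0 := by
            rw [List.getD_eq_getElem?_getD, List.getD_eq_getElem?_getD]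
            have h1 : t[a]? = nums[pos + 1 + a]? := by
              rw [ht, List.getElem?_drop]
            rw [h1]
          have htnev : ¬ t.getD a 0 = v := by
            have hlt2 : a < t.length := by omega
            have hlen3 : 0 < (t.dropWhile (fun x => x == v)).length := by
              rw [hrest, List.length_drop]; omega
            have h5 := List.dropWhile_get_zero_not (p := fun x => x == v) t hlen3
            have h6 : (t.dropWhile (fun x => x == v)).get ⟨0, hlen3⟩ = t[a]'hlt2 := by
              simp only [List.get_eq_getElem, hrest, List.getElem_drop]
              simp
            rw [List.getD_eq_getElem _ _ hlt2]
            intro hEq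
            apply h5
            rw [h6, hEq]
            simp
          -- nums.getD (pos + a) 0 = v
          have hprev : nums.getD (pos + 1 + a - 1) 0 = v := by
            cases Nat.eq_zero_or_pos a with
            | inl h0 =>
                simp only [h0, Nat.add_zero, Nat.add_sub_cancel]
                rfl
            | inr hpos' =>
                have hgp : nums.getD (pos + 1 + a - 1) 0 = t.getD (a - 1) 0 := by
                  rw [List.getD_eq_getElem?_getD, List.getD_eq_getElem?_getD]
                  have h1 : t[a - 1]? = nums[pos + 1 + (a - 1)]? := by
                    rw [ht, List.getElem?_drop]
                  rw [show pos + 1 + a - 1 = pos + 1 + (a - 1) by omega, h1]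
                rw [hgp]
                have hpre := List.takeWhile_prefix (l := t) (p := fun x => x == v)
                have hgetp : (t.takeWhile (fun x => x == v))[a - 1]'(by omega)
                    = t[a - 1]'(by omega) := hpre.getElem (by omega)
                have hmem : (t.takeWhile (fun x => x == v))[a - 1]'(by omega)
                    ∈ t.takeWhile (fun x => x == v) := List.getElem_mem _
                have := List.mem_takeWhile_imp hmem
                simp at this
                rw [List.getD_eq_getElem _ _ (by omega), ← hgetp, this]
          rw [hgt, hprev] at hdup
          exact htnev hdup
        have step3 : loopS nums k (pos + 1 + a) path X = dfsA nums k (pos + 1 + a) path X :=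
          (dfsA_eq_loopS nums k (pos + 1 + a) path X hk (by omega) hboundary).symm
        have hrest : t.dropWhile (fun x => x == v) = t.drop a := by
          rw [dropWhile_eq_drop_tw, ← ha]
        have hdropj : nums.drop (pos + 1 + a) = t.dropWhile (fun x => x == v) := by
          rw [hrest, ht, List.drop_drop]
        -- IH applications
        have ihX : X = dfsB (rleB t) (rem - 1) (path ++ [v]) ans := by
          rw [hX, ih (pos + 1) (path ++ [v]) ans (by omega) (by omega)]
          congr 1
          rw [hremdef]
          simp only [List.length_append, List.length_cons, List.length_nil]
          push_cast
          ring
        have ihJ : dfsA nums k (pos + 1 + a) path X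
            = dfsB (rleB (t.dropWhile (fun x => x == v))) rem path X := by
          rw [ih (pos + 1 + a) path X (by omega) (by omega), hdropj]
        -- RHS: unfold B one group
        have hrleB : rleB (nums.drop pos)
            = (v, 1 + (a : Int)) :: rleB (t.dropWhile (fun x => x == v)) := by
          rw [hd, rleB]
        rw [step1, step2, step3, ihJ, ihX, hrleB, dfsB]
        -- now pure fold algebra
        have hminpos : (0 : Int) ≤ min (1 + (a : Int)) rem := by omega
        set A' : Int := min (1 + (a : Int)) rem with hA'
        have hAnat : A' = ((A'.toNat : Nat) : Int) := by omega
        rw [hAnat]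
        rw [fold_countdown (rleB (t.dropWhile (fun x => x == v))) v rem path A'.toNat ans]
        congr 1
        -- inner folds agree
        by_cases ha0 : a = 0
        · -- t has no leading v: rleB t = rleB rest, fold over [0]
          have hr : t.dropWhile (fun x => x == v) = t := by
            apply takeWhile_eq_nil_dropWhile; omega
          have hA1 : ((A'.toNat : Nat) : Int) - 1 = 0 := by omega
          rw [hA1, pyRange_zero_down]
          simp only [List.foldl_cons, List.foldl_nil]
          rw [hr]
          simp
        · -- a ≥ 1: rleB t = (v, a) :: rleB rest
          rw [rleB_head_run ha.symm (by omega), dfsB]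
          have hmin2 : min ((a : Nat) : Int) (rem - 1) = ((A'.toNat : Nat) : Int) - 1 := by omega
          rw [hmin2]

-- ===== VERDICT (by name: the statement is the Claim_ definition above) =====
theorem subsetsSizeKWithDup_spec : Claim_equal_subsetsSizeKWithDup := by
  intro nums k _
  unfold Spec_subsetsSizeKWithDup subsetsSizeKWithDup subsetsSizeKWithDup_alt
  simp only []
  set s := PySem.List.sorted nums (fun x => x) false with hs
  have := main_lemma s k s.length 0 [] [] (by omega) (by omega)
  simpa using this
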